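-- pv_equiv track=rewrite | github.com/shrisawant144/astro | kundali/kundali_matching.py | _vasya
-- ===== SOURCE A (Python) =====
-- _VASYA_GROUPS = [
--     {"Aries", "Scorpio"},
--     {"Taurus", "Libra", "Capricorn"},
--     {"Gemini", "Virgo"},
--     {"Cancer"},
--     {"Leo"},
--     {"Sagittarius", "Pisces"},
--     {"Aquarius"},
-- ]
--
-- def _vasya(sign_m, sign_f):
--     """2 pts mutual, 1 pt one-way, 0 pt none."""
--     def in_same(s1, s2):
--         for grp in _VASYA_GROUPS:
--             if s1 in grp and s2 in grp:
--                 return True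
--         return False
--     mf = in_same(sign_m, sign_f)
--     if mf:
--         return 2, 2, "Mutual Vasya attraction"
--     return 0, 2, "No Vasya relationship"
-- ===== SOURCE B (Python) =====
-- _VASYA_GROUPS = [
--     {"Aries", "Scorpio"},
--     {"Taurus", "Libra", "Capricorn"},
--     {"Gemini", "Virgo"},
--     {"Cancer"},
--     {"Leo"},
--     {"Sagittarius", "Pisces"},
--     {"Aquarius"},
-- ]
--
-- # The whole compatibility RELATION, flattened once into a set of ordered pairs:
-- # every (a, b) with a and b in the same group.  A call is then one membership
-- # test of the tuple, with no per-call traversal of the groups and no index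
-- # comparison; unknown signs are simply absent from the relation.
-- _VASYA_PAIRS = {(a, b) for grp in _VASYA_GROUPS for a in grp for b in grp}
--
-- def _vasya(sign_m, sign_f):
--     """2 pts mutual, 1 pt one-way, 0 pt none."""
--     if (sign_m, sign_f) in _VASYA_PAIRS:
--         return 2, 2, "Mutual Vasya attraction"
--     return 0, 2, "No Vasya relationship"
-- ===== Notes on version B (the rewrite author's own statement) =====
-- stated objective: alternative
-- what changed: Instead of scanning the group list per call testing joint membership, B flattens the groups once into the full compatibility relation as a set of ordered pairs and answers each call with a single membership test of the tuple (sign_m, sign_f); unknown signs are handled implicitly by absence from the relation.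
import Mathlib
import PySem

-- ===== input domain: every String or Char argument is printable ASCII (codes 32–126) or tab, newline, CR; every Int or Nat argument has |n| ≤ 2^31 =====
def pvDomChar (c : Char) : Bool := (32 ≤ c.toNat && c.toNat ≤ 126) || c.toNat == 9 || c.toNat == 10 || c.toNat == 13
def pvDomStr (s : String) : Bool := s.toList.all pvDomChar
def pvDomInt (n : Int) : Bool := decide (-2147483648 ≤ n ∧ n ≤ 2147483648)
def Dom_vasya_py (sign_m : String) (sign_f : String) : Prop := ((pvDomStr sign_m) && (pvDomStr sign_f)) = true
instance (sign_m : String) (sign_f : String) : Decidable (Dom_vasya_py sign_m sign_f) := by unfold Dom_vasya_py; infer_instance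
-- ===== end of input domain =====

-- B flattens the groups once into the full compatibility relation (a set of ordered pairs)
-- and answers each call with a single tuple-membership test (alternative decomposition; same observable behaviour).

-- ===== PORT A =====
def vasyaGroups : List (PySem.Set String) :=
  [PySem.Set.ofList ["Aries", "Scorpio"],
   PySem.Set.ofList ["Taurus", "Libra", "Capricorn"],
   PySem.Set.ofList ["Gemini", "Virgo"],
   PySem.Set.ofList ["Cancer"],
   PySem.Set.ofList ["Leo"],
   PySem.Set.ofList ["Sagittarius", "Pisces"],
   PySem.Set.ofList ["Aquarius"]]

-- the inner function `in_same`: scan the groups, return True on the first containing both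
def inSame (s1 s2 : String) : List (PySem.Set String) → Bool
  | [] => false
  | grp :: rest =>
      if PySem.Set.contains grp s1 && PySem.Set.contains grp s2 then true
      else inSame s1 s2 rest

def vasya_py (sign_m : String) (sign_f : String) : Int × Int × String :=
  let mf := inSame sign_m sign_f vasyaGroups
  if mf then (2, 2, "Mutual Vasya attraction") else (0, 2, "No Vasya relationship")

-- ===== PORT B =====
-- _VASYA_PAIRS = {(a, b) for grp in _VASYA_GROUPS for a in grp for b in grp}
-- (a set built from sets: the result is order-independent, so the fold order is immaterial)
def vasyaPairs : PySem.Set (String × String) :=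
  vasyaGroups.foldl
    (fun s grp => grp.foldl (fun s a => grp.foldl (fun s b => PySem.Set.add s (a, b)) s) s)
    PySem.Set.empty

def vasya_py_alt (sign_m : String) (sign_f : String) : Int × Int × String :=
  if PySem.Set.contains vasyaPairs (sign_m, sign_f) then
    (2, 2, "Mutual Vasya attraction")
  else (0, 2, "No Vasya relationship")

-- ===== PRECONDITION & SPEC =====
def Spec_vasya_py (sign_m : String) (sign_f : String) (out : Int × Int × String) : Prop := out = vasya_py_alt sign_m sign_f
instance (sign_m : String) (sign_f : String) (out : Int × Int × String) : Decidable (Spec_vasya_py sign_m sign_f out) := by unfold Spec_vasya_py; infer_instance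

-- ===== CLAIM (what is proved, stated in full; the proofs are below) =====
def Claim_equal_vasya_py : Prop := ∀ (sign_m : String) (sign_f : String), Dom_vasya_py sign_m sign_f → Spec_vasya_py sign_m sign_f (vasya_py sign_m sign_f)

-- ===== LEMMAS AND PROOFS =====

-- A's group scan answers exactly membership of the pair in B's flattened relation.
theorem cond_eq (s1 s2 : String) :
    inSame s1 s2 vasyaGroups = PySem.Set.contains vasyaPairs (s1, s2) := by
  by_cases a0 : s1 = "Aries"
  · subst a0; simp [inSame, vasyaGroups, vasyaPairs, PySem.Set.contains, PySem.Set.ofList, PySem.Set.add, PySem.Set.empty]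
  by_cases a1 : s1 = "Scorpio"
  · subst a1; simp [inSame, vasyaGroups, vasyaPairs, PySem.Set.contains, PySem.Set.ofList, PySem.Set.add, PySem.Set.empty]
  by_cases a2 : s1 = "Taurus"
  · subst a2; simp [inSame, vasyaGroups, vasyaPairs, PySem.Set.contains, PySem.Set.ofList, PySem.Set.add, PySem.Set.empty]
  by_cases a3 : s1 = "Libra"
  · subst a3; simp [inSame, vasyaGroups, vasyaPairs, PySem.Set.contains, PySem.Set.ofList, PySem.Set.add, PySem.Set.empty]
  by_cases a4 : s1 = "Capricorn"
  · subst a4; simp [inSame, vasyaGroups, vasyaPairs, PySem.Set.contains, PySem.Set.ofList, PySem.Set.add, PySem.Set.empty]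
  by_cases a5 : s1 = "Gemini"
  · subst a5; simp [inSame, vasyaGroups, vasyaPairs, PySem.Set.contains, PySem.Set.ofList, PySem.Set.add, PySem.Set.empty]
  by_cases a6 : s1 = "Virgo"
  · subst a6; simp [inSame, vasyaGroups, vasyaPairs, PySem.Set.contains, PySem.Set.ofList, PySem.Set.add, PySem.Set.empty]
  by_cases a7 : s1 = "Cancer"
  · subst a7; simp [inSame, vasyaGroups, vasyaPairs, PySem.Set.contains, PySem.Set.ofList, PySem.Set.add, PySem.Set.empty]
  by_cases a8 : s1 = "Leo"
  · subst a8; simp [inSame, vasyaGroups, vasyaPairs, PySem.Set.contains, PySem.Set.ofList, PySem.Set.add, PySem.Set.empty]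
  by_cases a9 : s1 = "Sagittarius"
  · subst a9; simp [inSame, vasyaGroups, vasyaPairs, PySem.Set.contains, PySem.Set.ofList, PySem.Set.add, PySem.Set.empty]
  by_cases a10 : s1 = "Pisces"
  · subst a10; simp [inSame, vasyaGroups, vasyaPairs, PySem.Set.contains, PySem.Set.ofList, PySem.Set.add, PySem.Set.empty]
  by_cases a11 : s1 = "Aquarius"
  · subst a11; simp [inSame, vasyaGroups, vasyaPairs, PySem.Set.contains, PySem.Set.ofList, PySem.Set.add, PySem.Set.empty]
  simp [inSame, vasyaGroups, vasyaPairs, PySem.Set.contains, PySem.Set.ofList, PySem.Set.add, PySem.Set.empty, a0, a1, a2, a3, a4, a5, a6, a7, a8, a9, a10, a11]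

-- ===== VERDICT (by name: the statement is the Claim_ definition above) =====
theorem vasya_py_spec : Claim_equal_vasya_py := by
  intro s1 s2 _
  show vasya_py s1 s2 = vasya_py_alt s1 s2
  simp only [vasya_py, vasya_py_alt, cond_eq]
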